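-- pv_equiv track=rewrite | github.com/websines/gonova-document-parser | document_parser/nanonets_processor.py | _detect_signatures
-- ===== SOURCE A (Python) =====
-- from typing import Any, Dict, List, Optional
--
-- def _detect_signatures(markdown_output: str) -> List[str]:
--     """
--     Detect signatures in document.
--
--     Nanonets includes signature markers in output.
--     This is a simple heuristic - can be enhanced with ML.
--     """
--     signatures = []
--     lines = markdown_output.split("\n")
--
--     for i, line in enumerate(lines):
--         # Look for signature-related keywords
--         if any(
--             keyword in line.lower()
--             for keyword in ["signature", "signed", "authorized", "signatory"]
--         ):
--             signatures.append(f"page_{i // 50}")  # Rough page estimation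
--
--     return list(set(signatures))  # Deduplicate
-- ===== SOURCE B (Python) =====
-- def _detect_signatures(markdown_output: str) -> list:
--     """Page-chunk decomposition: check each estimated 50-line page once, in order.
--
--     Emits each page label at most once (no final set-dedup pass needed);
--     pages come out already in ascending page order.
--     """
--     keywords = ("signature", "signed", "authorized", "signatory")
--     lines = markdown_output.split("\n")
--     pages = []
--     for p in range((len(lines) + 49) // 50):
--         chunk = lines[p * 50 : (p + 1) * 50]
--         if any(any(k in ln.lower() for k in keywords) for ln in chunk):
--             pages.append(f"page_{p}")
--     return pages
-- ===== Notes on version B (the rewrite author's own statement) =====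
-- stated objective: alternative
-- what changed: A scans line-by-line, appends a page label per matching line and deduplicates at the end with list(set(...)); B iterates over 50-line page chunks, tests each chunk once with a nested any() and emits each page label at most once, in ascending page order, with no dedup pass.
import Mathlib
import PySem

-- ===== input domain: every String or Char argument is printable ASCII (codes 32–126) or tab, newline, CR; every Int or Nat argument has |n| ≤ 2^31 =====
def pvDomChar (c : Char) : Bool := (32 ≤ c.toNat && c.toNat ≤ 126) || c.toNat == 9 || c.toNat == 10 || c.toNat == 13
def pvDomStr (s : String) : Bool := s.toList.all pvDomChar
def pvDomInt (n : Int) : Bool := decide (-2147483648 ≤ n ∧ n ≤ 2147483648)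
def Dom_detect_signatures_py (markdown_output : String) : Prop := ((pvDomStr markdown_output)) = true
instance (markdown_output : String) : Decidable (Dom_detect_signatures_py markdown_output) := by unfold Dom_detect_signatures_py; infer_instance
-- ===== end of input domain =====

-- B replaces A's line-by-line scan + final list(set(...)) dedup by a single pass over 50-line
-- page chunks that emits each page label at most once (objective: alternative decomposition; not faster).
-- Python's list(set(...)) iteration order is hash-seed dependent; outputs are compared as sets,
-- and the A-port below renders the set in first-occurrence order.

-- shared helper: 'any(keyword in line.lower() for keyword in [...])'
def pvHasKw (line : String) : Bool :=
  ["signature", "signed", "authorized", "signatory"].any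
    (fun kw => PySem.Str.isIn kw (PySem.Str.lower line))

-- shared helper: f"page_{p}"
def pvPageLabel (p : Int) : String := "page_" ++ PySem.Int.toStr p

-- ===== PORT A =====
def detect_signatures_py (markdown_output : String) : List String :=
  let lines := (PySem.Str.split? markdown_output "\n").getD []
  let signatures :=
    (PySem.List.enumerate lines).foldl
      (fun acc x =>
        if pvHasKw x.2 then acc ++ [pvPageLabel (PySem.Int.floordiv x.1 50)] else acc) []
  PySem.Set.ofList signatures

-- ===== PORT B =====
def detect_signatures_py_alt (markdown_output : String) : List String :=
  let lines := (PySem.Str.split? markdown_output "\n").getD []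
  (PySem.List.pyRange 0 (PySem.Int.floordiv ((lines.length : Int) + 49) 50) 1).foldl
    (fun acc p =>
      if (PySem.List.slice lines (some (p * 50)) (some ((p + 1) * 50))).any pvHasKw
      then acc ++ [pvPageLabel p] else acc) []

-- ===== PRECONDITION & SPEC =====
def Spec_detect_signatures_py (markdown_output : String) (out : List String) : Prop := out = detect_signatures_py_alt markdown_output
instance (markdown_output : String) (out : List String) : Decidable (Spec_detect_signatures_py markdown_output out) := by unfold Spec_detect_signatures_py; infer_instance

-- ===== CLAIM (what is proved, stated in full; the proofs are below) =====
def Claim_equal_detect_signatures_py : Prop := ∀ (markdown_output : String), Dom_detect_signatures_py markdown_output → Spec_detect_signatures_py markdown_output (detect_signatures_py markdown_output)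

-- ===== LEMMAS AND PROOFS =====

-- ---- decimal rendering is injective on Nat ----

theorem pv_toDigitsCore_frame : ∀ (f n : Nat) (l : List Char),
    Nat.toDigitsCore 10 f n l = Nat.toDigitsCore 10 f n [] ++ l := by
  intro f
  induction f with
  | zero => intro n l; simp [Nat.toDigitsCore]
  | succ g ih =>
    intro n l
    simp only [Nat.toDigitsCore]
    by_cases h : n / 10 = 0
    · simp [h]
    · simp only [h, if_false]
      rw [ih (n/10) ((n % 10).digitChar :: l), ih (n/10) [(n % 10).digitChar]]
      simp

theorem pv_toDigitsCore_fuel : ∀ (n f f' : Nat), n < f → n < f' →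
    Nat.toDigitsCore 10 f n [] = Nat.toDigitsCore 10 f' n [] := by
  intro n
  induction n using Nat.strong_induction_on with
  | _ n ih =>
    intro f f' hf hf'
    obtain ⟨g, rfl⟩ : ∃ g, f = g + 1 := ⟨f - 1, by omega⟩
    obtain ⟨g', rfl⟩ : ∃ g', f' = g' + 1 := ⟨f' - 1, by omega⟩
    simp only [Nat.toDigitsCore]
    by_cases h : n / 10 = 0
    · simp [h]
    · simp only [h, if_false]
      rw [pv_toDigitsCore_frame g, pv_toDigitsCore_frame g']
      have hlt : n / 10 < n := Nat.div_lt_self (by omega) (by omega)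
      rw [ih (n/10) hlt g g' (by omega) (by omega)]

theorem pv_toDigits_base (n : Nat) (h : n < 10) : Nat.toDigits 10 n = [Nat.digitChar n] := by
  simp only [Nat.toDigits, Nat.toDigitsCore]
  have h1 : n / 10 = 0 := Nat.div_eq_of_lt h
  have h2 : n % 10 = n := Nat.mod_eq_of_lt h
  simp [h1, h2]

theorem pv_toDigits_rec (n : Nat) (h : 10 ≤ n) :
    Nat.toDigits 10 n = Nat.toDigits 10 (n / 10) ++ [Nat.digitChar (n % 10)] := by
  have h0 : ¬ (n / 10 = 0) := by omega
  have step : Nat.toDigits 10 n = Nat.toDigitsCore 10 n (n / 10) [(n % 10).digitChar] := by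
    simp only [Nat.toDigits]
    conv_lhs => simp only [Nat.toDigitsCore]
    simp [h0]
  rw [step, pv_toDigitsCore_frame n (n/10)]
  rw [pv_toDigitsCore_fuel (n/10) n (n/10+1) (Nat.div_lt_self (by omega) (by omega)) (by omega)]
  rfl

theorem pv_toDigits_ne_nil (n : Nat) : Nat.toDigits 10 n ≠ [] := by
  by_cases h : n < 10
  · rw [pv_toDigits_base n h]; simp
  · rw [pv_toDigits_rec n (by omega)]; simp

theorem pv_digitChar_inj : ∀ k < 10, ∀ j < 10, Nat.digitChar k = Nat.digitChar j → k = j := by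
  decide

theorem pv_toDigits_inj : ∀ (n m : Nat), Nat.toDigits 10 n = Nat.toDigits 10 m → n = m := by
  intro n
  induction n using Nat.strong_induction_on with
  | _ n ih =>
    intro m h
    by_cases hn : n < 10 <;> by_cases hm : m < 10
    · rw [pv_toDigits_base n hn, pv_toDigits_base m hm] at h
      exact pv_digitChar_inj n hn m hm (List.singleton_inj.mp h)
    · rw [pv_toDigits_base n hn, pv_toDigits_rec m (by omega)] at h
      cases hh : Nat.toDigits 10 (m/10) with
      | nil => exact absurd hh (pv_toDigits_ne_nil (m/10))
      | cons a l => rw [hh] at h; simp at h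
    · rw [pv_toDigits_rec n (by omega), pv_toDigits_base m hm] at h
      cases hh : Nat.toDigits 10 (n/10) with
      | nil => exact absurd hh (pv_toDigits_ne_nil (n/10))
      | cons a l => rw [hh] at h; simp at h
    · rw [pv_toDigits_rec n (by omega), pv_toDigits_rec m (by omega)] at h
      obtain ⟨h1, h2⟩ := List.append_inj' h (by simp)
      have e1 := ih (n/10) (Nat.div_lt_self (by omega) (by omega)) (m/10) h1
      have e2 := pv_digitChar_inj (n%10) (by omega) (m%10) (by omega) (by simpa using h2)
      omega

theorem pv_pageLabel_inj {p q : Int} (hp : 0 ≤ p) (hq : 0 ≤ q)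
    (h : pvPageLabel p = pvPageLabel q) : p = q := by
  unfold pvPageLabel at h
  have h2 : ("page_".toList ++ (PySem.Int.toStr p).toList) =
      ("page_".toList ++ (PySem.Int.toStr q).toList) := by
    rw [← String.toList_append, ← String.toList_append, h]
  have h3 : (PySem.Int.toStr p).toList = (PySem.Int.toStr q).toList :=
    List.append_cancel_left h2
  rw [PySem.Int.toList_toStr, PySem.Int.toList_toStr] at h3
  unfold PySem.Int.toChars at h3
  rw [if_neg (by omega), if_neg (by omega)] at h3
  have := pv_toDigits_inj p.toNat q.toNat h3
  omega

-- ---- Set.ofList facts ----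

theorem pv_ofList_sublist {α : Type} [BEq α] [LawfulBEq α] (l : List α) :
    (PySem.Set.ofList l).Sublist l := by
  induction l with
  | nil => simp [PySem.Set.ofList, PySem.Set.empty]
  | cons x xs ih =>
    rw [PySem.Set.ofList_cons]
    refine List.Sublist.cons₂ x (List.Sublist.trans ?_ ih)
    unfold PySem.Set.discard
    exact List.filter_sublist

theorem pv_ofList_map {α β : Type} [BEq α] [LawfulBEq α] [BEq β] [LawfulBEq β]
    (f : α → β) : ∀ (l : List α), (∀ x ∈ l, ∀ y ∈ l, f x = f y → x = y) →
    PySem.Set.ofList (l.map f) = (PySem.Set.ofList l).map f := by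
  intro l
  induction l with
  | nil => intro _; simp [PySem.Set.ofList, PySem.Set.empty]
  | cons x xs ih =>
    intro hinj
    rw [List.map_cons, PySem.Set.ofList_cons, PySem.Set.ofList_cons, List.map_cons]
    rw [ih (fun a ha b hb => hinj a (List.mem_cons_of_mem _ ha) b (List.mem_cons_of_mem _ hb))]
    congr 1
    unfold PySem.Set.discard
    rw [List.filter_map]
    rw [List.filter_congr (q := fun y => !y == x) ?_]
    intro y hy
    have hyx : y ∈ xs := (PySem.Set.mem_ofList xs y).mp hy
    simp only [Function.comp, Bool.not_eq_eq_eq_not]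
    by_cases hxy : y = x
    · subst hxy; simp
    · have : ¬ f y = f x := fun he =>
        hxy (hinj y (List.mem_cons_of_mem _ hyx) x (List.mem_cons_self) he)
      simp [hxy, this]

-- ---- the combinatorial core: hit pages in first-occurrence order = pages with a hit chunk ----

-- chunk p (0 ≤ p) contains a keyword line iff some keyword line's index k has k/50 = p
theorem pv_chunk_iff (lines : List String) (p : Int) (hp : 0 ≤ p) :
    ((PySem.List.slice lines (some (p * 50)) (some ((p + 1) * 50))).any pvHasKw = true) ↔
    ∃ (k : Nat) (hk : k < lines.length), pvHasKw lines[k] ∧ (k : Int) / 50 = p := by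
  obtain ⟨q, rfl⟩ : ∃ q : Nat, p = (q : Int) := ⟨p.toNat, by omega⟩
  have hsl : PySem.List.slice lines (some ((q:Int) * 50)) (some (((q:Int) + 1) * 50)) =
      (lines.drop (q*50)).take 50 := by
    have h1 : ((q:Int) * 50) = ((q*50 : Nat) : Int) := by push_cast; ring
    have h2 : (((q:Int) + 1) * 50) = ((q*50 : Nat) : Int) + ((50 : Nat) : Int) := by push_cast; ring
    rw [h1, h2, PySem.List.slice_natCast_add]
  rw [hsl, List.any_eq_true]
  constructor
  · rintro ⟨x, hx, hkw⟩
    obtain ⟨m, hm, rfl⟩ := List.mem_iff_getElem.mp hx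
    have hm' := hm
    simp only [List.length_take, List.length_drop] at hm'
    have hgt : ((lines.drop (q*50)).take 50)[m] = lines[q*50 + m]'(by omega) := by
      rw [List.getElem_take, List.getElem_drop]
    refine ⟨q*50 + m, by omega, ?_, by push_cast; omega⟩
    rw [← hgt]; exact hkw
  · rintro ⟨k, hk, hkw, hdiv⟩
    have hq : q * 50 ≤ k ∧ k < q * 50 + 50 := by omega
    refine ⟨lines[k], ?_, hkw⟩
    rw [List.mem_iff_getElem]
    refine ⟨k - q*50, by simp [List.length_take, List.length_drop]; omega, ?_⟩
    rw [List.getElem_take, List.getElem_drop]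
    congr 1
    omega


theorem pv_core (lines : List String) :
    PySem.Set.ofList
      (((PySem.List.enumerate lines).filter (fun x => pvHasKw x.2)).map
        (fun x => PySem.Int.floordiv x.1 50)) =
    (PySem.List.pyRange 0 (PySem.Int.floordiv ((lines.length : Int) + 49) 50) 1).filter
      (fun p => (PySem.List.slice lines (some (p * 50)) (some ((p + 1) * 50))).any pvHasKw) := by
  set H := ((PySem.List.enumerate lines).filter (fun x => pvHasKw x.2)).map
      (fun x => PySem.Int.floordiv x.1 50) with hH
  set B := (PySem.List.pyRange 0 (PySem.Int.floordiv ((lines.length : Int) + 49) 50) 1).filter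
      (fun p => (PySem.List.slice lines (some (p * 50)) (some ((p + 1) * 50))).any pvHasKw) with hB
  have hHmem : ∀ p : Int, p ∈ H ↔
      ∃ (k : Nat) (hk : k < lines.length), pvHasKw lines[k] ∧ (k : Int) / 50 = p := by
    intro p
    rw [hH, List.mem_map]
    constructor
    · rintro ⟨x, hx, rfl⟩
      obtain ⟨hxe, hxkw⟩ := List.mem_filter.mp hx
      obtain ⟨k, hk, rfl⟩ := (PySem.List.mem_enumerate_iff _ _ _).mp hxe
      exact ⟨k, hk, by simpa using hxkw, by
        rw [PySem.Int.floordiv_eq_ediv_of_pos (by norm_num)]; simp⟩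
    · rintro ⟨k, hk, hkw, hdiv⟩
      refine ⟨((k : Int), lines[k]), List.mem_filter.mpr ⟨?_, by simpa using hkw⟩, ?_⟩
      · exact (PySem.List.mem_enumerate_iff _ _ _).mpr ⟨k, hk, by simp⟩
      · rw [PySem.Int.floordiv_eq_ediv_of_pos (by norm_num)]; simpa using hdiv
  have hBmem : ∀ p : Int, p ∈ B ↔
      (0 ≤ p ∧ p < PySem.Int.floordiv ((lines.length : Int) + 49) 50 ∧
        ((PySem.List.slice lines (some (p * 50)) (some ((p + 1) * 50))).any pvHasKw = true)) := by
    intro p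
    rw [hB, List.mem_filter, PySem.List.mem_pyRange_one]
    tauto
  -- same members
  have hmemiff : ∀ p : Int, p ∈ PySem.Set.ofList H ↔ p ∈ B := by
    intro p
    rw [PySem.Set.mem_ofList, hHmem, hBmem]
    rw [PySem.Int.floordiv_eq_ediv_of_pos (show (0:Int) < 50 by norm_num)]
    constructor
    · rintro ⟨k, hk, hkw, hdiv⟩
      have hp : 0 ≤ p := by omega
      refine ⟨hp, by omega, (pv_chunk_iff lines p hp).mpr ⟨k, hk, hkw, hdiv⟩⟩
    · rintro ⟨hp, hlt, hany⟩
      exact (pv_chunk_iff lines p hp).mp hany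
  -- sortedness and nodup
  have hHpw : H.Pairwise (· ≤ ·) := by
    rw [hH]
    rw [List.pairwise_map]
    refine List.Pairwise.imp ?_ (List.Pairwise.sublist List.filter_sublist
      (PySem.List.pairwise_lt_enumerate lines 0))
    intro a b hab
    rw [PySem.Int.floordiv_eq_ediv_of_pos (by norm_num),
        PySem.Int.floordiv_eq_ediv_of_pos (by norm_num)]
    exact Int.ediv_le_ediv (by norm_num) (le_of_lt hab)
  have hLnd : (PySem.Set.ofList H).Nodup := PySem.Set.nodup_ofList H
  have hLsorted : (PySem.Set.ofList H).Pairwise (· < ·) := by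
    have hle : (PySem.Set.ofList H).Pairwise (· ≤ ·) :=
      List.Pairwise.sublist (pv_ofList_sublist H) hHpw
    exact (hle.and hLnd).imp (fun h => lt_of_le_of_ne h.1 h.2)
  have hRsorted : B.Pairwise (· < ·) := by
    rw [hB]
    exact List.Pairwise.sublist List.filter_sublist (PySem.List.pairwise_lt_pyRange_one _ _)
  have hRnd : B.Nodup := hRsorted.imp (fun h => ne_of_lt h)
  exact ((List.perm_ext_iff_of_nodup hLnd hRnd).mpr hmemiff).eq_of_pairwise
    (fun a b _ _ h h' => absurd h' (lt_asymm h)) hLsorted hRsorted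

-- ===== VERDICT (by name: the statement is the Claim_ definition above) =====
theorem detect_signatures_py_spec : Claim_equal_detect_signatures_py := by
  intro s _
  unfold Spec_detect_signatures_py detect_signatures_py detect_signatures_py_alt
  dsimp only
  rw [PySem.List.foldl_append_if (fun (x : Int × String) => pvHasKw x.2)
        (fun (x : Int × String) => pvPageLabel (PySem.Int.floordiv x.1 50)),
      PySem.List.foldl_append_if
        (fun p => (PySem.List.slice ((PySem.Str.split? s "\n").getD []) (some (p * 50))
            (some ((p + 1) * 50))).any pvHasKw) (fun (p : Int) => pvPageLabel p)]
  simp only [List.nil_append]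
  set lines := (PySem.Str.split? s "\n").getD [] with hlines
  have hmm : (((PySem.List.enumerate lines).filter (fun x => pvHasKw x.2)).map
      (fun x => pvPageLabel (PySem.Int.floordiv x.1 50))) =
      ((((PySem.List.enumerate lines).filter (fun x => pvHasKw x.2)).map
        (fun x => PySem.Int.floordiv x.1 50)).map pvPageLabel) := by
    rw [List.map_map]; rfl
  rw [hmm]
  rw [pv_ofList_map pvPageLabel _ ?hinj, pv_core]
  case hinj =>
    intro x hx y hy hfe
    have hnn : ∀ z ∈ ((PySem.List.enumerate lines).filter (fun x => pvHasKw x.2)).map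
        (fun x => PySem.Int.floordiv x.1 50), 0 ≤ z := by
      intro z hz
      obtain ⟨w, hw, rfl⟩ := List.mem_map.mp hz
      have hw' := (List.mem_filter.mp hw).1
      obtain ⟨k, hk, rfl⟩ := (PySem.List.mem_enumerate_iff _ _ _).mp hw'
      rw [PySem.Int.floordiv_eq_ediv_of_pos (by norm_num)]
      positivity
    exact pv_pageLabel_inj (hnn x hx) (hnn y hy) hfe
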